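-- pv_equiv track=rewrite | github.com/and0sha/magic_conc | app.py | find_representation
-- ===== SOURCE A (Python) =====
-- def find_representation(n):
--     def decompose(num):
--         result = []
--         num_str = str(num)
--         num_len = len(num_str)
--
--         while num != 0:
--             digits = [int(d) for d in str(num)]
--             k = digits[0]
--             kkkk = int(str(k) * num_len)
--
--             if num >= kkkk:
--                 result.append((kkkk, '+'))
--                 num -= kkkk
--             else:
--                 result.append((kkkk, '-'))
--                 num = kkkk - num
--
--             if num == 0:
--                 break
--
--             num_str = str(num)
--             num_len = len(num_str)
--
--         return result
--
--     def format_expression(decomposition):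
--         if not decomposition:
--             return ""
--         value, sign = decomposition[0]
--         if len(decomposition) == 1:
--             return str(value)
--         inner_expression = format_expression(decomposition[1:])
--         if sign == '+':
--             return f"{value} + ({inner_expression})"
--         else:
--             return f"{value} - ({inner_expression})"
--
--     decomposition = decompose(n)
--     expression = f"{n} = {format_expression(decomposition)}"
--     return expression
-- ===== SOURCE B (Python) =====
-- def find_representation(n):
--     # decompose arithmetically (no string manipulation): p = largest power of 10 <= num,
--     # d = leading digit, repdigit = d * (10^L - 1) / 9 computed by integer arithmetic
--     parts = []
--     num = n
--     while num != 0: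
--         p = 1
--         while num // (p * 10) != 0:
--             p *= 10
--         d = num // p
--         rep = d * (10 * p - 1) // 9
--         if num >= rep:
--             parts.append((rep, '+'))
--             num -= rep
--         else:
--             parts.append((rep, '-'))
--             num = rep - num
--     # build the expression iteratively from the innermost term outwards
--     if not parts:
--         inner = ""
--     else:
--         v, _ = parts[-1]
--         inner = str(v)
--         for v, s in reversed(parts[:-1]):
--             inner = f"{v} {s} ({inner})"
--     return f"{n} = {inner}"
-- ===== Notes on version B (the rewrite author's own statement) =====
-- stated objective: alternative
-- what changed: decompose now finds the leading digit and repdigit by pure integer arithmetic (power-of-10 loop and closed-form d*(10^L-1)//9) instead of converting to strings and back, and the recursive right-nested formatter is replaced by a single reverse pass building the expression from the innermost term outwards.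
import Mathlib
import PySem

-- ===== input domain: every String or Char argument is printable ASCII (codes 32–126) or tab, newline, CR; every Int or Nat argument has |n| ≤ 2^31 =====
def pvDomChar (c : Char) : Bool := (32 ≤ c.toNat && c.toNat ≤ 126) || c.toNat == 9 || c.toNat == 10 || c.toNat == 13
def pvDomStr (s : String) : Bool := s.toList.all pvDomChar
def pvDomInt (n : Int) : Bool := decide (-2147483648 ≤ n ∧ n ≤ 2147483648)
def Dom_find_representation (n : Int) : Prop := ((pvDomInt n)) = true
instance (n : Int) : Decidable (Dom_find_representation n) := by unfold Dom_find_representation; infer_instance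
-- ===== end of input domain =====

-- B replaces A's per-step string round-trips (str/int) by pure integer arithmetic (power-of-10
-- scan + closed-form repdigit) and A's recursive formatter by an iterative reverse pass.
-- Both ports assemble the result as List Char (PySem.Chars level) and convert once at the end.

-- ===== PORT A =====
-- int(d) for a one-character string d (total wrapper; inside Pre_ it is only applied to digits)
def pvCharInt (c : Char) : Int := (PySem.Int.ofChars? [c]).getD 0

-- the while-loop of A's `decompose`; state = (num, num_len, result); fuel only makes it total
def pvLoopA : Nat → Int → Int → List (Int × Char) → List (Int × Char)
  | 0, _, _, acc => acc
  | f+1, num, numLen, acc =>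
    if num = 0 then acc
    else
      let digits := (PySem.Int.toChars num).map pvCharInt
      let k := (PySem.List.pyGet? digits 0).getD 0
      let kkkk := (PySem.Int.ofChars? (List.flatten (List.replicate numLen.toNat (PySem.Int.toChars k)))).getD 0
      if kkkk ≤ num then
        let acc' := acc ++ [(kkkk, '+')]
        let num' := num - kkkk
        if num' = 0 then acc' else pvLoopA f num' ((PySem.Int.toChars num').length : Int) acc'
      else
        let acc' := acc ++ [(kkkk, '-')]
        let num' := kkkk - num
        if num' = 0 then acc' else pvLoopA f num' ((PySem.Int.toChars num').length : Int) acc'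

-- A's recursive `format_expression`
def pvFormatA : List (Int × Char) → List Char
  | [] => []
  | (v, s) :: rest =>
    if rest = [] then PySem.Int.toChars v
    else if s = '+' then PySem.Int.toChars v ++ [' ', '+', ' ', '('] ++ pvFormatA rest ++ [')']
    else PySem.Int.toChars v ++ [' ', '-', ' ', '('] ++ pvFormatA rest ++ [')']

def find_representation (n : Int) : String :=
  String.ofList (PySem.Int.toChars n ++ [' ', '=', ' '] ++
    pvFormatA (pvLoopA (n.toNat + 1) n ((PySem.Int.toChars n).length : Int) []))

-- ===== PORT B =====
-- B's inner while: grow p by factors of 10 while num // (p*10) != 0; fuel only makes it total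
def pvFindP : Nat → Int → Int → Int
  | 0, _, p => p
  | f+1, num, p => if PySem.Int.floordiv num (p * 10) ≠ 0 then pvFindP f num (p * 10) else p

-- B's decompose loop: leading digit and repdigit by integer arithmetic
def pvLoopB : Nat → Int → List (Int × Char) → List (Int × Char)
  | 0, _, acc => acc
  | f+1, num, acc =>
    if num = 0 then acc
    else
      let p := pvFindP (num.toNat + 1) num 1
      let d := PySem.Int.floordiv num p
      let rep := PySem.Int.floordiv (d * (10 * p - 1)) 9
      if rep ≤ num then pvLoopB f (num - rep) (acc ++ [(rep, '+')])
      else pvLoopB f (rep - num) (acc ++ [(rep, '-')])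

-- B's iterative formatter: innermost term, then a reverse pass wrapping outwards
def pvFormatB (parts : List (Int × Char)) : List Char :=
  match parts.reverse with
  | [] => []
  | (v, _) :: restRev =>
    restRev.foldl (fun inner vs => PySem.Int.toChars vs.1 ++ [' ', vs.2, ' ', '('] ++ inner ++ [')'])
      (PySem.Int.toChars v)

def find_representation_alt (n : Int) : String :=
  String.ofList (PySem.Int.toChars n ++ [' ', '=', ' '] ++ pvFormatB (pvLoopB (n.toNat + 1) n []))

-- ===== PRECONDITION & SPEC =====
-- A raises ValueError on negative n (int('-') on the sign character); Pre_ excludes exactly those.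
def Pre_find_representation (n : Int) : Prop := 0 ≤ n
instance (n : Int) : Decidable (Pre_find_representation n) := by unfold Pre_find_representation; infer_instance
def pvWitness_find_representation : Int := (1234)

def Spec_find_representation (n : Int) (out : String) : Prop := out = find_representation_alt n
instance (n : Int) (out : String) : Decidable (Spec_find_representation n out) := by unfold Spec_find_representation; infer_instance

-- ===== CLAIM (what is proved, stated in full; the proofs are below) =====
def Claim_equal_find_representation : Prop := ∀ (n : Int), Dom_find_representation n → Pre_find_representation n → Spec_find_representation n (find_representation n)

-- ===== LEMMAS AND PROOFS =====

-- toDigitsCore: the accumulator factors out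
theorem pvCore_acc (f n : Nat) (l : List Char) :
    Nat.toDigitsCore 10 f n l = Nat.toDigitsCore 10 f n [] ++ l := by
  induction f generalizing n l with
  | zero => simp [Nat.toDigitsCore]
  | succ f ih =>
    simp only [Nat.toDigitsCore]
    split
    · rfl
    · rw [ih (n/10) (Nat.digitChar (n % 10) :: l), ih (n/10) [Nat.digitChar (n % 10)]]
      simp

-- toDigitsCore: any sufficient fuel gives the same digits
theorem pvCore_fuel (f : Nat) : ∀ (g n : Nat) (l : List Char), 0 < f → 0 < g →
    n < 10 ^ f → n < 10 ^ g →
    Nat.toDigitsCore 10 f n l = Nat.toDigitsCore 10 g n l := by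
  induction f with
  | zero => intro g n l hf; exact absurd hf (lt_irrefl 0)
  | succ f ih =>
    intro g n l _ hg h1 h2
    cases g with
    | zero => exact absurd hg (lt_irrefl 0)
    | succ g =>
      simp only [Nat.toDigitsCore]
      split
      · rfl
      · rename_i hne
        have hn : 10 ≤ n := by
          by_contra hlt
          exact hne (Nat.div_eq_of_lt (by omega))
        have hf1 : n / 10 < 10 ^ f := by
          rw [Nat.div_lt_iff_lt_mul (by norm_num)]
          calc n < 10 ^ (f+1) := h1
          _ = 10 ^ f * 10 := by rw [pow_succ]
        have hg1 : n / 10 < 10 ^ g := by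
          rw [Nat.div_lt_iff_lt_mul (by norm_num)]
          calc n < 10 ^ (g+1) := h2
          _ = 10 ^ g * 10 := by rw [pow_succ]
        have hfpos : 0 < f := by
          rcases Nat.eq_zero_or_pos f with h | h
          · subst h; simp at hf1; omega
          · exact h
        have hgpos : 0 < g := by
          rcases Nat.eq_zero_or_pos g with h | h
          · subst h; simp at hg1; omega
          · exact h
        exact ih g (n/10) _ hfpos hgpos hf1 hg1

theorem pvToDigits_lt10 (m : Nat) (h : m < 10) : Nat.toDigits 10 m = [Nat.digitChar m] := by
  simp only [Nat.toDigits, Nat.toDigitsCore]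
  rw [Nat.div_eq_of_lt h]
  simp [Nat.mod_eq_of_lt h]

theorem pvToDigits_shift (m : Nat) (h : 10 ≤ m) :
    Nat.toDigits 10 m = Nat.toDigits 10 (m / 10) ++ [Nat.digitChar (m % 10)] := by
  have hne : m / 10 ≠ 0 := by
    intro h0; have := Nat.div_eq_of_lt (show m < 10 by omega); omega
  have hm10 : m / 10 < 10 ^ m := lt_of_le_of_lt (Nat.div_le_self m 10) (Nat.lt_pow_self (by norm_num))
  have hm10' : m / 10 < 10 ^ (m / 10 + 1) :=
    lt_of_lt_of_le (Nat.lt_pow_self (by norm_num)) (Nat.pow_le_pow_right (by norm_num) (by omega))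
  have step : Nat.toDigitsCore 10 (m+1) m [] = Nat.toDigitsCore 10 m (m/10) [(m % 10).digitChar] := by
    simp only [Nat.toDigitsCore]
    rw [if_neg hne]
  show Nat.toDigitsCore 10 (m+1) m [] = Nat.toDigitsCore 10 (m/10+1) (m/10) [] ++ [(m % 10).digitChar]
  rw [step, pvCore_fuel m (m/10+1) (m/10) _ (by omega) (by omega) hm10 hm10', pvCore_acc]

-- decimal characterisation: length and leading digit of Nat.toDigits 10
theorem pvToDigits_char (e : Nat) : ∀ m : Nat, 10 ^ e ≤ m → m < 10 ^ (e + 1) →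
    (Nat.toDigits 10 m).length = e + 1 ∧
    (Nat.toDigits 10 m).head? = some (Nat.digitChar (m / 10 ^ e)) := by
  induction e with
  | zero =>
    intro m h1 h2
    simp only [pow_zero] at h1 h2
    rw [pvToDigits_lt10 m (by omega)]
    simp
  | succ e ih =>
    intro m h1 h2
    have hm : 10 ≤ m := le_trans (by
      calc (10:Nat) = 10 ^ 1 := (pow_one 10).symm
      _ ≤ 10 ^ (e+1) := Nat.pow_le_pow_right (by norm_num) (by omega)) h1
    have hb1 : 10 ^ e ≤ m / 10 := by
      rw [Nat.le_div_iff_mul_le (by norm_num)]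
      calc 10 ^ e * 10 = 10 ^ (e+1) := (pow_succ 10 e).symm
      _ ≤ m := h1
    have hb2 : m / 10 < 10 ^ (e + 1) := by
      rw [Nat.div_lt_iff_lt_mul (by norm_num)]
      calc m < 10 ^ (e+2) := h2
      _ = 10 ^ (e+1) * 10 := by rw [pow_succ]
    obtain ⟨hlen, hhead⟩ := ih (m / 10) hb1 hb2
    rw [pvToDigits_shift m hm]
    constructor
    · simp [hlen]
    · rw [List.head?_append, hhead]
      simp [Nat.div_div_eq_div_mul, pow_succ, mul_comm]

theorem pvPow_bracket_unique (j e m : Nat) (h1 : 10 ^ j ≤ m) (h2 : m < 10 * 10 ^ j)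
    (h3 : 10 ^ e ≤ m) (h4 : m < 10 * 10 ^ e) : j = e := by
  by_contra hne
  rcases Nat.lt_or_ge j e with h | h
  · have : 10 * 10 ^ j ≤ 10 ^ e := by
      calc 10 * 10 ^ j = 10 ^ (j+1) := by rw [pow_succ, mul_comm]
      _ ≤ 10 ^ e := Nat.pow_le_pow_right (by norm_num) (by omega)
    omega
  · have he : e < j := by omega
    have : 10 * 10 ^ e ≤ 10 ^ j := by
      calc 10 * 10 ^ e = 10 ^ (e+1) := by rw [pow_succ, mul_comm]
      _ ≤ 10 ^ j := Nat.pow_le_pow_right (by norm_num) (by omega)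
    omega

theorem pvCharInt_digit (d : Nat) (h : d < 10) : pvCharInt (Nat.digitChar d) = (d : Int) := by
  interval_cases d <;> decide

-- int(str(d) * (e+1)) = d * (10^(e+1) - 1) // 9 for a single digit d, at most 10 digits total
theorem pvRepdigit_val (d e : Nat) (hd1 : 1 ≤ d) (hd9 : d ≤ 9) (he : e ≤ 9) :
    (PySem.Int.ofChars? (List.flatten (List.replicate (e + 1) (PySem.Int.toChars (d : Int))))).getD 0
      = PySem.Int.floordiv ((d : Int) * (10 * (10 : Int) ^ e - 1)) 9 := by
  interval_cases d <;> interval_cases e <;> decide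

theorem pvFindP_spec (f : Nat) : ∀ (num p : Int), 0 < p → p ≤ num → num < p * 10 ^ f →
    ∃ j : Nat, pvFindP f num p = p * 10 ^ j ∧ pvFindP f num p ≤ num ∧ num < 10 * pvFindP f num p := by
  induction f with
  | zero =>
    intro num p hp hle hlt
    simp only [pow_zero, mul_one] at hlt
    omega
  | succ f ih =>
    intro num p hp hle hlt
    simp only [pvFindP]
    by_cases hc : PySem.Int.floordiv num (p * 10) ≠ 0
    · rw [if_pos hc]
      have h10 : p * 10 ≤ num := by
        by_contra hlt10
        exact hc ((PySem.Int.floordiv_eq_iff_of_pos (by positivity)).mpr (by constructor <;> omega))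
      obtain ⟨j, hj, hle', hlt'⟩ := ih num (p * 10) (by positivity) h10 (by
        calc num < p * 10 ^ (f+1) := hlt
        _ = p * 10 * 10 ^ f := by ring)
      exact ⟨j + 1, by rw [hj]; ring, hle', hlt'⟩
    · rw [if_neg hc]
      rw [not_not] at hc
      have := (PySem.Int.floordiv_eq_iff_of_pos (show (0:Int) < p * 10 by positivity)).mp hc
      exact ⟨0, by ring, hle, by omega⟩

theorem pvRep_bounds (num p : Int) (h1 : 1 ≤ num)
    (hp : 0 < p) (hple : p ≤ num) (hplt : num < 10 * p) :
    1 ≤ PySem.Int.floordiv (PySem.Int.floordiv num p * (10 * p - 1)) 9 ∧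
    PySem.Int.floordiv (PySem.Int.floordiv num p * (10 * p - 1)) 9 < 2 * num := by
  have hd1 : (1:Int) ≤ PySem.Int.floordiv num p := by
    rw [PySem.Int.le_floordiv_iff_mul_le hp]
    simpa using hple
  have hdm := PySem.Int.floordiv_mul_add_mod num p
  have hmod : 0 ≤ PySem.Int.mod num p := PySem.Int.mod_nonneg num hp
  set d := PySem.Int.floordiv num p with hd
  have hdple : d * p ≤ num := by omega
  have hdp1 : (1:Int) * 1 ≤ d * p := mul_le_mul hd1 (by omega) (by norm_num) (by omega)
  constructor
  · rw [PySem.Int.le_floordiv_iff_mul_le (by norm_num)]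
    nlinarith
  · rw [PySem.Int.floordiv_lt_iff_lt_mul (by norm_num)]
    nlinarith

-- the string-built repdigit of A's step equals the arithmetic repdigit of B's step
theorem pvStep_eq (num : Int) (h1 : 1 ≤ num) (h2 : num ≤ 2147483648) :
    (PySem.Int.ofChars? (List.flatten (List.replicate (((PySem.Int.toChars num).length : Int)).toNat
        (PySem.Int.toChars ((PySem.List.pyGet? ((PySem.Int.toChars num).map pvCharInt) 0).getD 0))))).getD 0
      = PySem.Int.floordiv (PySem.Int.floordiv num (pvFindP (num.toNat + 1) num 1) *
          (10 * pvFindP (num.toNat + 1) num 1 - 1)) 9 := by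
  have hm : num = ((num.toNat : Nat) : Int) := (Int.toNat_of_nonneg (by omega)).symm
  set m := num.toNat with hmdef
  have hm1 : 1 ≤ m := by omega
  have hch : PySem.Int.toChars num = Nat.toDigits 10 m := by
    simp only [PySem.Int.toChars, if_neg (show ¬ num < 0 by omega)]
    rfl
  have he1 : 10 ^ Nat.log 10 m ≤ m := Nat.pow_log_le_self 10 (by omega)
  have he2 : m < 10 ^ (Nat.log 10 m + 1) := Nat.lt_pow_succ_log_self (by norm_num) m
  set e := Nat.log 10 m with hedef
  have hee : e ≤ 9 := by
    by_contra hgt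
    have h10 : (10:Nat) ^ 10 ≤ 10 ^ e := Nat.pow_le_pow_right (by norm_num) (by omega)
    have hpow : (10:Nat) ^ 10 = 10000000000 := by norm_num
    have hmle : m ≤ 2147483648 := by omega
    omega
  obtain ⟨hlen, hhead⟩ := pvToDigits_char e m he1 he2
  have hd1 : 1 ≤ m / 10 ^ e := by
    rw [Nat.le_div_iff_mul_le (pow_pos (show (0:Nat) < 10 by norm_num) e)]
    simpa using he1
  have hd9 : m / 10 ^ e ≤ 9 := by
    have hlt : m / 10 ^ e < 10 := Nat.div_lt_of_lt_mul (by
      calc m < 10 ^ (e+1) := he2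
      _ = 10 ^ e * 10 := by rw [pow_succ])
    omega
  set d := m / 10 ^ e with hddef
  obtain ⟨tl, htl⟩ : ∃ tl, Nat.toDigits 10 m = Nat.digitChar d :: tl := by
    cases hds : Nat.toDigits 10 m with
    | nil => rw [hds] at hhead; simp at hhead
    | cons a tl =>
      rw [hds] at hhead
      simp only [List.head?_cons, Option.some.injEq] at hhead
      exact ⟨tl, by rw [hhead]⟩
  have hk : (PySem.List.pyGet? ((PySem.Int.toChars num).map pvCharInt) 0).getD 0 = (d : Int) := by
    rw [hch, htl]
    simp [PySem.List.pyGet?, PySem.List.pyIdx?]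
    exact pvCharInt_digit d (by omega)
  have hlenInt : (((PySem.Int.toChars num).length : Int)).toNat = e + 1 := by
    rw [hch, hlen]; simp
  rw [hk, hlenInt, pvRepdigit_val d e hd1 hd9 hee]
  -- B's side
  have hnum10 : num < 1 * 10 ^ (m + 1) := by
    have hlt : m < 10 ^ m := Nat.lt_pow_self (by norm_num)
    have hle : (10:Nat) ^ m ≤ 10 ^ (m+1) := Nat.pow_le_pow_right (by norm_num) (by omega)
    have : m < 10 ^ (m+1) := by omega
    rw [hm, one_mul]
    exact_mod_cast this
  obtain ⟨j, hpj, hple, hplt⟩ := pvFindP_spec (m + 1) num 1 one_pos h1 hnum10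
  have hjm1 : (10:Nat) ^ j ≤ m := by
    have : ((10:Nat) ^ j : Int) ≤ (m : Int) := by rw [← hm]; push_cast; omega
    exact_mod_cast this
  have hjm2 : m < 10 * 10 ^ j := by
    have : (m : Int) < 10 * ((10:Nat) ^ j : Int) := by rw [← hm]; push_cast; omega
    exact_mod_cast this
  have hje : j = e := pvPow_bracket_unique j e m hjm1 hjm2 he1 (by
    calc m < 10 ^ (e+1) := he2
    _ = 10 * 10 ^ e := by rw [pow_succ, mul_comm])
  rw [hje] at hpj
  have hpj' : pvFindP (m + 1) num 1 = (((10:Nat) ^ e : Nat) : Int) := by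
    rw [hpj]; push_cast; ring
  have hdq : PySem.Int.floordiv num (pvFindP (m + 1) num 1) = (d : Int) := by
    rw [hpj', hm, PySem.Int.floordiv_natCast]
  rw [hdq, hpj']
  push_cast
  ring_nf

theorem pvLoopB_zero (f : Nat) (acc : List (Int × Char)) : pvLoopB f 0 acc = acc := by
  cases f <;> simp [pvLoopB]

-- the two loops produce the same decomposition
theorem pvLoops_eq (f : Nat) : ∀ (num : Int) (acc : List (Int × Char)),
    1 ≤ num → num ≤ 2147483648 →
    pvLoopA f num ((PySem.Int.toChars num).length : Int) acc = pvLoopB f num acc := by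
  induction f with
  | zero => intro num acc _ _; rfl
  | succ f ih =>
    intro num acc h1 h2
    have hne : ¬ (num = 0) := by omega
    simp only [pvLoopA, pvLoopB]
    rw [if_neg hne, if_neg hne]
    rw [pvStep_eq num h1 h2]
    have hnum10 : num < 1 * 10 ^ (num.toNat + 1) := by
      have hlt : num.toNat < 10 ^ num.toNat := Nat.lt_pow_self (by norm_num)
      have hle : (10:Nat) ^ num.toNat ≤ 10 ^ (num.toNat + 1) := Nat.pow_le_pow_right (by norm_num) (by omega)
      have h3 : num.toNat < 10 ^ (num.toNat + 1) := by omega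
      rw [one_mul]
      calc num = ((num.toNat : Nat) : Int) := (Int.toNat_of_nonneg (by omega)).symm
      _ < (((10:Nat) ^ (num.toNat + 1) : Nat) : Int) := by exact_mod_cast h3
      _ = (10:Int) ^ (num.toNat + 1) := by push_cast; ring
    obtain ⟨j, hpj, hple, _⟩ := pvFindP_spec (num.toNat + 1) num 1 one_pos h1 hnum10
    have hppos : 0 < pvFindP (num.toNat + 1) num 1 := by
      rw [hpj]; positivity
    obtain ⟨hr1, hr2⟩ := pvRep_bounds num (pvFindP (num.toNat + 1) num 1) h1 hppos (by omega) (by omega)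
    set rep := PySem.Int.floordiv (PySem.Int.floordiv num (pvFindP (num.toNat + 1) num 1) *
        (10 * pvFindP (num.toNat + 1) num 1 - 1)) 9 with hrep
    by_cases hbr : rep ≤ num
    · rw [if_pos hbr, if_pos hbr]
      by_cases hz : num - rep = 0
      · rw [if_pos hz, hz, pvLoopB_zero]
      · rw [if_neg hz]
        exact ih (num - rep) (acc ++ [(rep, '+')]) (by omega) (by omega)
    · rw [if_neg hbr, if_neg hbr]
      by_cases hz : rep - num = 0
      · rw [if_pos hz, hz, pvLoopB_zero]
      · rw [if_neg hz]
        exact ih (rep - num) (acc ++ [(rep, '-')]) (by omega) (by omega)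

-- loopB only appends '+'/'-' signs
theorem pvLoopB_signs (f : Nat) : ∀ (num : Int) (acc : List (Int × Char)),
    (∀ x ∈ acc, x.2 = '+' ∨ x.2 = '-') →
    ∀ x ∈ pvLoopB f num acc, x.2 = '+' ∨ x.2 = '-' := by
  induction f with
  | zero => intro num acc hacc; simpa [pvLoopB] using hacc
  | succ f ih =>
    intro num acc hacc
    simp only [pvLoopB]
    by_cases h0 : num = 0
    · rw [if_pos h0]; exact hacc
    · rw [if_neg h0]
      split
      · exact ih _ _ (by
          intro x hx
          rcases List.mem_append.mp hx with h | h
          · exact hacc x h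
          · left; simp at h; rw [h])
      · exact ih _ _ (by
          intro x hx
          rcases List.mem_append.mp hx with h | h
          · exact hacc x h
          · right; simp at h; rw [h])

theorem pvFormatB_cons (v : Int) (s : Char) (rest : List (Int × Char)) (h : rest ≠ []) :
    pvFormatB ((v, s) :: rest) = PySem.Int.toChars v ++ [' ', s, ' ', '('] ++ pvFormatB rest ++ [')'] := by
  obtain ⟨⟨vw, sw⟩, R, hrev⟩ : ∃ w R, rest.reverse = w :: R := by
    cases hr : rest.reverse with
    | nil => exact absurd (List.reverse_eq_nil_iff.mp hr) h
    | cons w R => exact ⟨w, R, rfl⟩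
  simp only [pvFormatB, List.reverse_cons, hrev, List.cons_append, List.foldl_append, List.foldl_cons,
    List.foldl_nil]

theorem pvFormatA_cons (v : Int) (s : Char) (y : Int × Char) (t : List (Int × Char)) :
    pvFormatA ((v, s) :: y :: t) =
      if s = '+' then PySem.Int.toChars v ++ [' ', '+', ' ', '('] ++ pvFormatA (y :: t) ++ [')']
      else PySem.Int.toChars v ++ [' ', '-', ' ', '('] ++ pvFormatA (y :: t) ++ [')'] := rfl

theorem pvFormat_eq (parts : List (Int × Char)) (h : ∀ x ∈ parts, x.2 = '+' ∨ x.2 = '-') :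
    pvFormatA parts = pvFormatB parts := by
  induction parts with
  | nil => rfl
  | cons hd rest ih =>
    obtain ⟨v, s⟩ := hd
    cases rest with
    | nil => simp [pvFormatA, pvFormatB]
    | cons y t =>
      have hr : pvFormatA (y :: t) = pvFormatB (y :: t) := ih (by
        intro x hx; exact h x (by simp [hx]))
      rw [pvFormatA_cons, pvFormatB_cons v s (y :: t) (by simp), hr]
      rcases h (v, s) (by simp) with hs | hs <;> simp only at hs <;> rw [hs] <;> simp

-- ===== VERDICT (by name: the statement is the Claim_ definition above) =====
theorem find_representation_spec : Claim_equal_find_representation := by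
  intro n hdom hpre
  unfold Spec_find_representation
  have hb : -2147483648 ≤ n ∧ n ≤ 2147483648 := by
    have := of_decide_eq_true hdom
    exact this
  have hpre' : (0:Int) ≤ n := hpre
  rcases eq_or_lt_of_le hpre' with h0 | h1
  · rw [← h0]; decide
  · unfold find_representation find_representation_alt
    rw [pvLoops_eq (n.toNat + 1) n [] (by omega) hb.2]
    rw [pvFormat_eq _ (pvLoopB_signs (n.toNat + 1) n [] (by simp))]
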